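-- pv_equiv track=rewrite | github.com/HunterLaugh/codewars_kata_python | Diamond.py | diamond
-- ===== SOURCE A (Python) =====
-- def diamond(n):
-- 	if n%2==0 or n<0:
-- 		return
--
-- 	halfN=int((n-1)/2)
--
-- 	iLine=1  # line
-- 	jAsterisk=1	 # *
-- 	kSpace=halfN
-- 	Result=""
--
-- 	# 1--3--5--n
-- 	while iLine<=halfN+1:
-- 		Result=Result+" " * kSpace
-- 		Result=Result+"*" *jAsterisk + "\n"
--
-- 		jAsterisk+=2
-- 		kSpace-=1
--
-- 		iLine+=1
--
-- 	jAsterisk=n-2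
-- 	kSpace=1
--
-- 	# print n-2--n-4----1
-- 	while iLine<=n:
-- 		Result=Result+" " *kSpace
-- 		Result=Result+"*" *jAsterisk+"\n"
--
-- 		kSpace+=1
-- 		jAsterisk-=2
--
-- 		iLine+=1
--
-- 	return Result
-- ===== SOURCE B (Python) =====
-- def diamond(n):
--     if n % 2 == 0 or n < 0:
--         return
--     halfN = (n - 1) // 2
--     lines = []
--     for i in range(n):
--         d = abs(halfN - i)
--         lines.append(' ' * d + '*' * (n - 2 * d) + '\n')
--     return ''.join(lines)
-- ===== Notes on version B (the rewrite author's own statement) =====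
-- stated objective: simpler
-- what changed: Replaces A's two directional while-loops with separate star/space counters by a single pass over all n rows using the closed-form distance d=abs(halfN-i) per row, collected in a list and joined once.
import Mathlib
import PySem

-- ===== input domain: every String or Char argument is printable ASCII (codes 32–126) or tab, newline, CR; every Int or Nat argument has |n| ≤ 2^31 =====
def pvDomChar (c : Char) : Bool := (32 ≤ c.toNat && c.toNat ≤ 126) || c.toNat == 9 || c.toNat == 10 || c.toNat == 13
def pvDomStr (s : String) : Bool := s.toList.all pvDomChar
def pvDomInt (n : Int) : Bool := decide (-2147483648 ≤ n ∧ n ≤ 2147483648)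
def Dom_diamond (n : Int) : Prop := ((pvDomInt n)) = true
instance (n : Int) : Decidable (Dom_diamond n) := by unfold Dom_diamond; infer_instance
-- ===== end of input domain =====

-- B replaces A's two directional while-loops by one closed-form pass (d = |halfN - i| per row); objective: simpler.

-- ===== PORT A =====
-- first while loop: while iLine <= halfN+1 (fuel = number of remaining iterations)
def diamondLoop1 : Nat → Int → Int → List Char → List Char
  | 0, _, _, res => res
  | f + 1, jAsterisk, kSpace, res =>
      diamondLoop1 f (jAsterisk + 2) (kSpace - 1)
        (res ++ PySem.List.pyRepeat [' '] kSpace ++ PySem.List.pyRepeat ['*'] jAsterisk ++ ['\n'])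

-- second while loop: while iLine <= n
def diamondLoop2 : Nat → Int → Int → List Char → List Char
  | 0, _, _, res => res
  | f + 1, jAsterisk, kSpace, res =>
      diamondLoop2 f (jAsterisk - 2) (kSpace + 1)
        (res ++ PySem.List.pyRepeat [' '] kSpace ++ PySem.List.pyRepeat ['*'] jAsterisk ++ ['\n'])

-- the body after the guard: loop1 runs iLine = 1 .. halfN+1, loop2 runs iLine = halfN+2 .. n
def diamondBody (n halfN : Int) : List Char :=
  diamondLoop2 (n - (halfN + 1)).toNat (n - 2) 1 (diamondLoop1 (halfN + 1).toNat 1 halfN [])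

def diamond (n : Int) : Option String :=
  if PySem.Int.mod n 2 == 0 || decide (n < 0) then none
  else
    -- int((n-1)/2): float division then int() truncation = truncdiv, exact for |n| ≤ 2^31 < 2^53
    some (String.ofList (diamondBody n (PySem.Int.truncdiv (n - 1) 2)))

-- ===== PORT B =====
def diamondRow (n halfN : Int) (i : Int) : List Char :=
  PySem.List.pyRepeat [' '] |halfN - i| ++ PySem.List.pyRepeat ['*'] (n - 2 * |halfN - i|) ++ ['\n']

def diamond_alt (n : Int) : Option String :=
  if PySem.Int.mod n 2 == 0 || decide (n < 0) then none
  else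
    some (String.ofList (PySem.Chars.join []
      ((PySem.List.pyRange 0 n 1).map (diamondRow n (PySem.Int.floordiv (n - 1) 2)))))

-- ===== PRECONDITION & SPEC =====
def Spec_diamond (n : Int) (out : Option String) : Prop := out = diamond_alt n
instance (n : Int) (out : Option String) : Decidable (Spec_diamond n out) := by unfold Spec_diamond; infer_instance

-- ===== CLAIM (what is proved, stated in full; the proofs are below) =====
def Claim_equal_diamond : Prop := ∀ (n : Int), Dom_diamond n → Spec_diamond n (diamond n)

-- ===== LEMMAS AND PROOFS =====

-- ''.join(lines) is concatenation
theorem join_nil_eq_flatten (l : List (List Char)) : PySem.Chars.join [] l = l.flatten := by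
  simp only [PySem.Chars.join]
  induction l with
  | nil => rfl
  | cons x xs ih =>
    cases xs with
    | nil => simp [List.intercalate]
    | cons y ys =>
      simp only [List.intercalate, List.intersperse] at *
      simp_all

-- closed form of A's first loop
theorem diamondLoop1_spec (f : Nat) : ∀ (j k : Int) (res : List Char),
    diamondLoop1 f j k res =
      res ++ ((List.range f).map (fun t : Nat =>
        PySem.List.pyRepeat [' '] (k - (t : Int)) ++ PySem.List.pyRepeat ['*'] (j + 2 * (t : Int)) ++ ['\n'])).flatten := by
  induction f with
  | zero => intro j k res; simp [diamondLoop1]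
  | succ f ih =>
    intro j k res
    rw [diamondLoop1, ih]
    have hstep : ((List.range (f + 1)).map (fun t : Nat =>
          PySem.List.pyRepeat [' '] (k - (t : Int)) ++ PySem.List.pyRepeat ['*'] (j + 2 * (t : Int)) ++ ['\n'])).flatten
        = (PySem.List.pyRepeat [' '] k ++ PySem.List.pyRepeat ['*'] j ++ ['\n']) ++
          ((List.range f).map (fun t : Nat =>
            PySem.List.pyRepeat [' '] ((k - 1) - (t : Int)) ++ PySem.List.pyRepeat ['*'] ((j + 2) + 2 * (t : Int)) ++ ['\n'])).flatten := by
      rw [List.range_succ_eq_map, List.map_cons, List.map_map, List.flatten_cons]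
      congr 1
      · norm_num
      · apply congrArg
        apply List.map_congr_left
        intro t _
        simp only [Function.comp_apply]
        push_cast
        ring_nf
    rw [hstep]
    simp [List.append_assoc]

-- closed form of A's second loop
theorem diamondLoop2_spec (f : Nat) : ∀ (j k : Int) (res : List Char),
    diamondLoop2 f j k res =
      res ++ ((List.range f).map (fun t : Nat =>
        PySem.List.pyRepeat [' '] (k + (t : Int)) ++ PySem.List.pyRepeat ['*'] (j - 2 * (t : Int)) ++ ['\n'])).flatten := by
  induction f with
  | zero => intro j k res; simp [diamondLoop2]
  | succ f ih =>
    intro j k res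
    rw [diamondLoop2, ih]
    have hstep : ((List.range (f + 1)).map (fun t : Nat =>
          PySem.List.pyRepeat [' '] (k + (t : Int)) ++ PySem.List.pyRepeat ['*'] (j - 2 * (t : Int)) ++ ['\n'])).flatten
        = (PySem.List.pyRepeat [' '] k ++ PySem.List.pyRepeat ['*'] j ++ ['\n']) ++
          ((List.range f).map (fun t : Nat =>
            PySem.List.pyRepeat [' '] ((k + 1) + (t : Int)) ++ PySem.List.pyRepeat ['*'] ((j - 2) - 2 * (t : Int)) ++ ['\n'])).flatten := by
      rw [List.range_succ_eq_map, List.map_cons, List.map_map, List.flatten_cons]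
      congr 1
      · norm_num
      · apply congrArg
        apply List.map_congr_left
        intro t _
        simp only [Function.comp_apply]
        push_cast
        ring_nf
    rw [hstep]
    simp [List.append_assoc]

-- ===== VERDICT (by name: the statement is the Claim_ definition above) =====
theorem diamond_spec : Claim_equal_diamond := by
  intro n _
  unfold Spec_diamond diamond diamond_alt
  by_cases hg : (PySem.Int.mod n 2 == 0 || decide (n < 0)) = true
  · rw [if_pos hg, if_pos hg]
  · rw [if_neg hg, if_neg hg]
    simp only [Bool.or_eq_true, beq_iff_eq, decide_eq_true_eq, not_or] at hg
    obtain ⟨hodd, hnn⟩ := hg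
    -- n is odd and nonnegative, so n = 2*h+1 with h ≥ 0
    have h2 : (0:Int) < 2 := by norm_num
    have hmod : PySem.Int.mod n 2 = n % 2 := PySem.Int.mod_eq_emod_of_pos h2
    have hfd : PySem.Int.floordiv (n - 1) 2 = (n - 1) / 2 :=
      PySem.Int.floordiv_eq_ediv_of_pos h2
    have hn1 : 1 ≤ n := by rw [hmod] at hodd; omega
    set h : Int := (n - 1) / 2 with hh
    have hneq : n = 2 * h + 1 := by rw [hmod] at hodd; omega
    have hh0 : 0 ≤ h := by omega
    have htd : PySem.Int.truncdiv (n - 1) 2 = h := by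
      simp only [PySem.Int.truncdiv]
      rw [Int.tdiv_eq_ediv_of_dvd (by omega)]
    rw [htd, hfd]
    congr 1
    apply congrArg
    rw [join_nil_eq_flatten]
    unfold diamondBody
    rw [diamondLoop1_spec, diamondLoop2_spec, List.nil_append]
    have hrange : PySem.List.pyRange 0 n 1 = (List.range n.toNat).map (fun k : Nat => (k : Int)) := by
      have hn : n = ((n.toNat : Nat) : Int) := by omega
      conv_lhs => rw [hn]
      rw [PySem.List.pyRange_zero_natCast]
    have hsplit : n.toNat = (h + 1).toNat + (n - (h + 1)).toNat := by omega
    rw [hrange, hsplit, List.range_add, List.map_append, List.map_append, List.flatten_append,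
        List.map_map, List.map_map]
    congr 1
    · apply congrArg
      apply List.map_congr_left
      intro t ht
      rw [List.mem_range] at ht
      simp only [Function.comp_apply, diamondRow]
      have habs : |h - (t : Int)| = h - (t : Int) := abs_of_nonneg (by omega)
      have e2 : n - 2 * (h - (t : Int)) = 1 + 2 * (t : Int) := by omega
      rw [habs, e2]
    · apply congrArg
      rw [List.map_map]
      apply List.map_congr_left
      intro t ht
      rw [List.mem_range] at ht
      simp only [Function.comp_apply, diamondRow]
      have habs : |h - (((h + 1).toNat + t : Nat) : Int)| = 1 + (t : Int) := by
        rw [abs_of_nonpos (by push_cast; omega)]; push_cast; omega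
      have e2 : n - 2 * (1 + (t : Int)) = (n - 2) - 2 * (t : Int) := by ring
      rw [habs, e2]
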